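-- pv_equiv track=rewrite | github.com/Abdullah230/pyHub | Pattern_Searching/Finite_Automata_Pattern_Searching.py | faTable
-- ===== SOURCE A (Python) =====
-- def uniqueValues(text):
--     values = []
--     for i in text:
--         if i in values:
--             pass
--         else:
--             values.append(i)
--     return values
--
-- def jump(text, letter):
--     temp = text+letter
--     N = len(temp)
--     selected = 0
--     for i in range(len(temp)-1):
--         if temp[0:i+1] == temp[N-(i+1):N]:
--             selected = i+1
--
--     return selected
--
-- def faTable(text):
--     tList = uniqueValues(text)
--     temp = ""
--     tl = []
--     table = []
--     for i in range(len(text) + 1):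
--         tl = []
--         for j in range(len(tList)):
--             if i == 0 and tList[j] == text[0]:
--                 tl.append(1)
--
--             elif i == 0:
--                 tl.append(0)
--
--             elif i < len(text):
--                 if tList[j] == text[i]:
--                     tl.append(i+1)
--                 else:
--                     tl.append(jump(temp,tList[j]))
--
--             else:
--                 tl.append(jump(temp,tList[j]))
--
--         if i < len(text):
--             temp = temp + text[i]
--
--         else:
--             temp = ""
--         table.append(tl)
--
--     return table, tList
-- ===== SOURCE B (Python) =====
-- def faTable(text):
--     # KMP-style automaton construction: each mismatch row is copied from the row of
--     # the current border (failure) state, so no substring comparisons are needed.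
--     m = len(text)
--     alphabet = list(dict.fromkeys(text))
--     table = []
--     lnk = 0
--     for i in range(m + 1):
--         fallback = table[lnk] if i else [0] * len(alphabet)
--         row = [i + 1 if i < m and c == text[i] else fallback[j]
--                for j, c in enumerate(alphabet)]
--         table.append(row)
--         if 0 < i < m:
--             lnk = fallback[alphabet.index(text[i])]
--     return table, alphabet
-- ===== Notes on version B (the rewrite author's own statement) =====
-- stated objective: faster
-- what changed: A recomputes, for every table cell, the longest border of temp+letter by comparing all prefix/suffix slice pairs (the jump helper); B builds the same automaton table KMP-style in one pass, copying each mismatch transition from the failure state's already-built row and updating the failure link from that row, with no substring comparisons at all.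
import Mathlib
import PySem

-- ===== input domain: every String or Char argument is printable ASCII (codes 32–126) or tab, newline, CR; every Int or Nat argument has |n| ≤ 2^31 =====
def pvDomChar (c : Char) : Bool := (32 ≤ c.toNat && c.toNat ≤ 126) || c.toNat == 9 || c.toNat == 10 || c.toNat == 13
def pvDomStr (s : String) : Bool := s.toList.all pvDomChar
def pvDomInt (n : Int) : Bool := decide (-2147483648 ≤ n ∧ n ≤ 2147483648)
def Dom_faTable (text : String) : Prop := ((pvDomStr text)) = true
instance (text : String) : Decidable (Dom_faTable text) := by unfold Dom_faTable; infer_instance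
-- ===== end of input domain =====

-- B replaces A's per-entry quadratic border search (jump) by the KMP-style automaton
-- construction that copies mismatch transitions from the failure state's row: faster.

-- ===== PORT A =====
-- Python's 1-character strings (the elements of tList) are built by pvCharStr
def pvCharStr (c : Char) : String := String.ofList [c]

-- A's helper uniqueValues: iterates text's characters (1-char strings), appends unseen ones
def pvUniqueValues (text : String) : List String :=
  (text.toList.map pvCharStr).foldl
    (fun values i => if i ∈ values then values else values ++ [i]) []

-- A's helper jump (Python strings carried as char lists; slices are Python slices)
def pvJump (text letter : List Char) : Int :=
  let temp := text ++ letter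
  let N : Int := PySem.List.len temp
  (PySem.List.pyRange 0 (N - 1) 1).foldl
    (fun selected i =>
      if PySem.List.slice temp (some 0) (some (i + 1))
           = PySem.List.slice temp (some (N - (i + 1))) (some N)
      then i + 1
      else selected) 0

-- the value A's inner loop appends to tl for the 1-char string s = tList[j]
def pvEntryA (l temp : List Char) (i : Int) (s : String) : Int :=
  if i = 0 ∧ s = PySem.List.pyGetD (l.map pvCharStr) 0 "" then 1
  else if i = 0 then 0
  else if i < PySem.List.len l then
    if s = pvCharStr (PySem.List.pyGetD l i ' ') then i + 1
    else pvJump temp s.toList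
  else pvJump temp s.toList

-- the body of A's outer loop; state = (temp, table)
def pvStepA (l : List Char) (tList : List String) (st : List Char × List (List Int)) (i : Int) :
    List Char × List (List Int) :=
  let tl := (PySem.List.pyRange 0 (PySem.List.len tList) 1).foldl
    (fun tl j => tl ++ [pvEntryA l st.1 i (PySem.List.pyGetD tList j "")]) []
  let temp' := if i < PySem.List.len l then st.1 ++ [PySem.List.pyGetD l i ' '] else []
  (temp', st.2 ++ [tl])

def faTable (text : String) : List (List Int) × List String :=
  let l := text.toList
  let tList := pvUniqueValues text
  let st := (PySem.List.pyRange 0 (PySem.List.len l + 1) 1).foldl (pvStepA l tList) ([], [])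
  (st.2, tList)

-- ===== PORT B =====
-- the body of B's loop; state = (table, lnk)
def pvStepB (l : List Char) (alphabet : List String) (st : List (List Int) × Int) (i : Int) :
    List (List Int) × Int :=
  let m : Int := PySem.List.len l
  let fallback := if i ≠ 0 then PySem.List.pyGetD st.1 st.2 []
                  else PySem.List.pyRepeat [(0 : Int)] (PySem.List.len alphabet)
  let row := (PySem.List.enumerate alphabet 0).foldl
    (fun row jc =>
      row ++ [if i < m ∧ jc.2 = pvCharStr (PySem.List.pyGetD l i ' ') then i + 1
              else PySem.List.pyGetD fallback jc.1 0]) []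
  let lnk' := if 0 < i ∧ i < m then
      PySem.List.pyGetD fallback
        ((((PySem.List.index? alphabet (pvCharStr (PySem.List.pyGetD l i ' '))).getD 0 : ℕ) : Int)) 0
    else st.2
  (st.1 ++ [row], lnk')

def faTable_alt (text : String) : List (List Int) × List String :=
  let l := text.toList
  let alphabet := (PySem.List.dedup l).map pvCharStr
  let st := (PySem.List.pyRange 0 (PySem.List.len l + 1) 1).foldl (pvStepB l alphabet) ([], 0)
  (st.1, alphabet)

-- ===== PRECONDITION & SPEC =====
def Spec_faTable (text : String) (out : List (List Int) × List String) : Prop := out = faTable_alt text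
instance (text : String) (out : List (List Int) × List String) : Decidable (Spec_faTable text out) := by unfold Spec_faTable; infer_instance

-- ===== CLAIM (what is proved, stated in full; the proofs are below) =====
def Claim_equal_faTable : Prop := ∀ (text : String), Dom_faTable text → Spec_faTable text (faTable text)

-- ===== LEMMAS AND PROOFS =====

-- the common mathematical description of both tables:
-- pvG p i c = the longest k ≤ i with take k p a suffix of take i p ++ [c] (A's jump value),
-- pvPi = the KMP failure function, pvDelta = the automaton transition, pvRow = one table row.
def pvG (p : List Char) (i : ℕ) (c : Char) : ℕ :=
  Nat.findGreatest (fun k => p.take k <:+ (p.take i ++ [c])) i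

def pvPi (p : List Char) : ℕ → ℕ
  | 0 => 0
  | j + 1 => pvG p j (p.getD j ' ')

def pvDelta (p : List Char) (j : ℕ) (c : Char) : ℕ :=
  if j < p.length ∧ c = p.getD j ' ' then j + 1 else pvG p j c

def pvRow (p : List Char) (i : ℕ) : List Int :=
  (PySem.List.dedup p).map (fun c => (pvDelta p i c : ℤ))

theorem pvCharStr_inj {b c : Char} : pvCharStr b = pvCharStr c ↔ b = c := by
  constructor
  · intro h
    have := congrArg String.toList h
    simpa [pvCharStr, String.toList_ofList] using this
  · rintro rfl; rfl

theorem pvToList_charStr (c : Char) : (pvCharStr c).toList = [c] := by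
  simp [pvCharStr, String.toList_ofList]

theorem pvFold_unique_map (f : Char → String) (hf : Function.Injective f) :
    ∀ (l : List Char) (acc : List Char),
      (l.map f).foldl (fun v i => if i ∈ v then v else v ++ [i]) (acc.map f)
        = (l.foldl (fun v i => if i ∈ v then v else v ++ [i]) acc).map f := by
  intro l
  induction l with
  | nil => intro acc; simp
  | cons x xs ih =>
    intro acc
    rw [List.map_cons, List.foldl_cons, List.foldl_cons]
    by_cases h : x ∈ acc
    · rw [if_pos ((List.mem_map_of_injective hf).mpr h), if_pos h]
      exact ih acc
    · rw [if_neg (fun hc => h ((List.mem_map_of_injective hf).mp hc)), if_neg h,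
        show (acc.map f ++ [f x]) = (acc ++ [x]).map f by simp]
      exact ih (acc ++ [x])

theorem pvFoldChar_eq_dedup (l : List Char) :
    l.foldl (fun v i => if i ∈ v then v else v ++ [i]) [] = PySem.List.dedup l := by
  have h : (fun (v : List Char) (i : Char) => if i ∈ v then v else v ++ [i]) = PySem.Set.add := by
    funext v i
    by_cases hm : i ∈ v <;> simp [PySem.Set.add, hm]
  rw [h]; rfl

theorem pvUniqueValues_eq (text : String) :
    pvUniqueValues text = (PySem.List.dedup text.toList).map pvCharStr := by
  have hinj : Function.Injective pvCharStr := fun a b h => pvCharStr_inj.mp h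
  have h := pvFold_unique_map pvCharStr hinj text.toList []
  simp only [List.map_nil] at h
  unfold pvUniqueValues
  rw [h, pvFoldChar_eq_dedup]

-- suffix of a longer suffix
theorem pvSuffix_of_suffix_le {s t w : List Char} (hs : s <:+ w) (ht : t <:+ w)
    (h : s.length ≤ t.length) : s <:+ t := by
  rw [← List.reverse_prefix] at hs ht ⊢
  exact List.prefix_of_prefix_length_le hs ht (by simpa)

-- (a ++ [x]) is a suffix of (b ++ [y]) iff x = y and a is a suffix of b
theorem pvConcat_suffix_concat {a b : List Char} {x y : Char} :
    (a ++ [x]) <:+ (b ++ [y]) ↔ x = y ∧ a <:+ b := by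
  have h1 : (a ++ [x]).reverse = x :: a.reverse := by simp
  have h2 : (b ++ [y]).reverse = y :: b.reverse := by simp
  rw [← List.reverse_prefix, h1, h2, List.cons_prefix_cons, List.reverse_prefix]

theorem pvTake_succ_getD {p : List Char} {i : ℕ} (h : i < p.length) :
    p.take (i + 1) = p.take i ++ [p.getD i ' '] := by
  rw [List.take_add_one]
  simp [List.getElem?_eq_getElem h]

theorem pvPred_succ_iff {p : List Char} {i k : ℕ} {c : Char} (hk : k < i) (hi : i ≤ p.length) :
    (p.take (k + 1) <:+ (p.take i ++ [c])) ↔ (p.getD k ' ' = c ∧ p.take k <:+ p.take i) := by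
  rw [pvTake_succ_getD (lt_of_lt_of_le hk hi), pvConcat_suffix_concat]

theorem pvG_le {p : List Char} {i : ℕ} {c : Char} : pvG p i c ≤ i := Nat.findGreatest_le i

theorem pvG_suffix {p : List Char} {i : ℕ} {c : Char} :
    p.take (pvG p i c) <:+ (p.take i ++ [c]) :=
 by
  have h : p.take 0 <:+ (p.take i ++ [c]) := by
    rw [List.take_zero]; exact List.nil_suffix
  exact Nat.findGreatest_spec (P := fun k => p.take k <:+ (p.take i ++ [c])) (Nat.zero_le i) h

theorem pvLe_G {p : List Char} {i k : ℕ} {c : Char} (hk : k ≤ i)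
    (h : p.take k <:+ (p.take i ++ [c])) : k ≤ pvG p i c :=
  Nat.le_findGreatest hk h

theorem pvG_zero {p : List Char} {c : Char} : pvG p 0 c = 0 :=
  Nat.le_zero.mp (Nat.findGreatest_le 0)

theorem pvPi_succ (p : List Char) (j : ℕ) : pvPi p (j + 1) = pvG p j (p.getD j ' ') := rfl

theorem pvPi_lt {p : List Char} {i : ℕ} (h1 : 1 ≤ i) : pvPi p i < i := by
  obtain ⟨j, rfl⟩ : ∃ j, i = j + 1 := ⟨i - 1, by omega⟩
  rw [pvPi_succ]
  exact Nat.lt_of_le_of_lt pvG_le (by omega)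

theorem pvPi_suffix {p : List Char} {i : ℕ} (h1 : 1 ≤ i) (h2 : i ≤ p.length) :
    p.take (pvPi p i) <:+ p.take i := by
  obtain ⟨j, rfl⟩ : ∃ j, i = j + 1 := ⟨i - 1, by omega⟩
  rw [pvPi_succ, pvTake_succ_getD (by omega)]
  exact pvG_suffix

theorem pvLe_pi {p : List Char} {i k : ℕ} (h1 : 1 ≤ i) (h2 : i ≤ p.length) (hk : k < i)
    (h : p.take k <:+ p.take i) : k ≤ pvPi p i := by
  obtain ⟨j, rfl⟩ : ∃ j, i = j + 1 := ⟨i - 1, by omega⟩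
  rw [pvPi_succ]
  apply pvLe_G (by omega)
  rw [← pvTake_succ_getD (by omega)]
  exact h

theorem pvLen_take_eq {p : List Char} {k : ℕ} (h : k ≤ p.length) : (p.take k).length = k := by
  simp [Nat.min_eq_left h]

-- THE CRUX: a transition scanned from state i equals the full transition from state pvPi i
theorem pvCrux {p : List Char} {i : ℕ} (h1 : 1 ≤ i) (h2 : i ≤ p.length) (c : Char) :
    pvG p i c = pvDelta p (pvPi p i) c := by
  have hjlt : pvPi p i < i := pvPi_lt h1
  have hjsuf : p.take (pvPi p i) <:+ p.take i := pvPi_suffix h1 h2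
  apply Nat.le_antisymm
  · rcases Nat.eq_zero_or_pos (pvG p i c) with h0 | h0
    · rw [h0]; exact Nat.zero_le _
    · obtain ⟨g', hg'⟩ : ∃ g', pvG p i c = g' + 1 := ⟨pvG p i c - 1, by omega⟩
      have hgle : g' + 1 ≤ i := hg' ▸ pvG_le
      have hsuf := pvG_suffix (p := p) (i := i) (c := c)
      rw [hg'] at hsuf
      have hps := (pvPred_succ_iff (by omega) h2).mp hsuf
      have hg'j : g' ≤ pvPi p i := pvLe_pi h1 h2 (by omega) hps.2
      have hg'suf : p.take g' <:+ p.take (pvPi p i) :=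
        pvSuffix_of_suffix_le hps.2 hjsuf
          (by rw [pvLen_take_eq (by omega), pvLen_take_eq (by omega)]; exact hg'j)
      rw [hg']
      unfold pvDelta
      split_ifs with hm
      · omega
      · have hne : g' + 1 ≤ pvPi p i := by
          by_contra hcon
          have heq : g' = pvPi p i := by omega
          exact hm ⟨by omega, by rw [← heq]; exact hps.1.symm⟩
        apply pvLe_G hne
        rw [pvTake_succ_getD (by omega), hps.1]
        exact pvConcat_suffix_concat.mpr ⟨rfl, hg'suf⟩
  · unfold pvDelta
    split_ifs with hm
    · apply pvLe_G (by omega)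
      rw [pvTake_succ_getD hm.1, ← hm.2]
      exact pvConcat_suffix_concat.mpr ⟨rfl, hjsuf⟩
    · rcases Nat.eq_zero_or_pos (pvG p (pvPi p i) c) with h0 | h0
      · rw [h0]; exact Nat.zero_le _
      · obtain ⟨h', hh'⟩ : ∃ h'', pvG p (pvPi p i) c = h'' + 1 :=
          ⟨pvG p (pvPi p i) c - 1, by omega⟩
        have hle : h' + 1 ≤ pvPi p i := hh' ▸ pvG_le
        have hsuf := pvG_suffix (p := p) (i := pvPi p i) (c := c)
        rw [hh'] at hsuf
        have hps := (pvPred_succ_iff (by omega) (by omega)).mp hsuf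
        rw [hh']
        apply pvLe_G (by omega)
        rw [pvTake_succ_getD (by omega), hps.1]
        exact pvConcat_suffix_concat.mpr ⟨rfl, hps.2.trans hjsuf⟩

-- the ascending "keep the last matching border length" loop computes Nat.findGreatest
theorem pvJump_loop {p : List Char} {i : ℕ} (hi : i ≤ p.length) (c : Char) :
    ∀ n : ℕ, n ≤ i →
    (PySem.List.pyRange 0 (n : ℤ) 1).foldl
      (fun selected iv =>
        if PySem.List.slice (p.take i ++ [c]) (some 0) (some (iv + 1))
             = PySem.List.slice (p.take i ++ [c]) (some ((i : ℤ) + 1 - (iv + 1))) (some ((i : ℤ) + 1))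
        then iv + 1 else selected) 0
      = ((Nat.findGreatest (fun k => p.take k <:+ (p.take i ++ [c])) n : ℕ) : ℤ) := by
  intro n
  induction n with
  | zero => simp [PySem.List.pyRange_one_eq_nil]
  | succ n ih =>
    intro hn
    rw [show ((n + 1 : ℕ) : ℤ) = (n : ℤ) + 1 by push_cast; ring,
      PySem.List.pyRange_one_succ_right (by positivity), List.foldl_append, ih (by omega)]
    simp only [List.foldl_cons, List.foldl_nil]
    have hXlen : (p.take i ++ [c]).length = i + 1 := by
      simp [pvLen_take_eq hi]
    have e1 : PySem.List.slice (p.take i ++ [c]) (some 0) (some ((n : ℤ) + 1))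
        = p.take (n + 1) := by
      rw [PySem.List.slice_zero_start, show ((n : ℤ) + 1) = ((n + 1 : ℕ) : ℤ) by push_cast; ring,
        PySem.List.slice_to_natCast, List.take_append_of_le_length (by rw [pvLen_take_eq hi]; omega),
        List.take_take, Nat.min_eq_left (by omega)]
    have e2 : PySem.List.slice (p.take i ++ [c]) (some ((i : ℤ) + 1 - ((n : ℤ) + 1))) (some ((i : ℤ) + 1))
        = (p.take i ++ [c]).drop (i - n) := by
      rw [show ((i : ℤ) + 1 - ((n : ℤ) + 1)) = ((i - n : ℕ) : ℤ) by omega,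
        show ((i : ℤ) + 1) = ((i + 1 : ℕ) : ℤ) by push_cast; ring,
        PySem.List.slice_natCast]
      exact List.take_of_length_le (by rw [List.length_drop, hXlen])
    have hcond : (PySem.List.slice (p.take i ++ [c]) (some 0) (some ((n : ℤ) + 1))
        = PySem.List.slice (p.take i ++ [c]) (some ((i : ℤ) + 1 - ((n : ℤ) + 1))) (some ((i : ℤ) + 1)))
        ↔ (p.take (n + 1) <:+ (p.take i ++ [c])) := by
      rw [e1, e2, List.suffix_iff_eq_drop, pvLen_take_eq (by omega), hXlen,
        show i + 1 - (n + 1) = i - n by omega]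
    rw [Nat.findGreatest_succ]
    by_cases hP : p.take (n + 1) <:+ (p.take i ++ [c])
    · rw [if_pos (hcond.mpr hP), if_pos hP]
      all_goals omega
    · rw [if_neg (fun hcn => hP (hcond.mp hcn)), if_neg hP]

-- A's jump on temp = p.take i computes pvG p i c
theorem pvJump_eq {p : List Char} {i : ℕ} (hi : i ≤ p.length) (c : Char) :
    pvJump (p.take i) [c] = ((pvG p i c : ℕ) : ℤ) := by
  have hlen : PySem.List.len (p.take i ++ [c]) = (i : ℤ) + 1 := by
    rw [PySem.List.len_eq]
    simp [pvLen_take_eq hi]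
  simp only [pvJump, hlen]
  rw [show (i : ℤ) + 1 - 1 = (i : ℤ) by ring]
  exact pvJump_loop hi c i le_rfl

-- A's inner-loop entry equals pvDelta
theorem pvEntryA_eq {p : List Char} {N : ℕ} {c : Char} (hN : N ≤ p.length) (hc : c ∈ p) :
    pvEntryA p (p.take N) (N : ℤ) (pvCharStr c) = ((pvDelta p N c : ℕ) : ℤ) := by
  have h0 : 0 < p.length := List.length_pos_of_mem hc
  unfold pvEntryA pvDelta
  by_cases hN0 : N = 0
  · subst hN0
    have hget : PySem.List.pyGetD (p.map pvCharStr) 0 "" = pvCharStr (p.getD 0 ' ') := by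
      cases p with
      | nil => simp at h0
      | cons a t => simp [PySem.List.pyGetD_zero_cons]
    rw [hget]
    by_cases hcc : c = p.getD 0 ' '
    · rw [if_pos ⟨by norm_num, pvCharStr_inj.mpr hcc⟩, if_pos ⟨h0, hcc⟩]
      norm_num
    · rw [if_neg (fun h => hcc (pvCharStr_inj.mp h.2)), if_pos (by norm_num),
        if_neg (fun h => hcc h.2), pvG_zero]
      norm_num
  · have hi0 : ¬ ((N : ℤ) = 0 ∧ pvCharStr c = PySem.List.pyGetD (p.map pvCharStr) 0 "") := by
      rintro ⟨h, -⟩; omega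
    rw [if_neg hi0, if_neg (by omega : ¬ ((N : ℤ) = 0))]
    by_cases hNm : N < p.length
    · have hlt : (N : ℤ) < PySem.List.len p := by rw [PySem.List.len_eq]; exact_mod_cast hNm
      have hget : PySem.List.pyGetD p (N : ℤ) ' ' = p.getD N ' ' := by
        simp [PySem.List.pyGetD_natCast]
      rw [if_pos hlt, hget]
      by_cases hcc : c = p.getD N ' '
      · rw [if_pos (pvCharStr_inj.mpr hcc), if_pos ⟨hNm, hcc⟩]
        push_cast; ring
      · rw [if_neg (fun h => hcc (pvCharStr_inj.mp h)), if_neg (fun h => hcc h.2),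
          pvToList_charStr, pvJump_eq (by omega) c]
    · have hNe : N = p.length := by omega
      rw [if_neg (by rw [PySem.List.len_eq]; omega : ¬ ((N : ℤ) < PySem.List.len p)),
        if_neg (fun h => hNm h.1), pvToList_charStr, pvJump_eq hN c]

-- A's inner loop builds pvRow
theorem pvInnerA_eq (text : String) {N : ℕ} (hN : N ≤ text.toList.length) :
    (PySem.List.pyRange 0 (PySem.List.len (pvUniqueValues text)) 1).foldl
      (fun tl j => tl ++ [pvEntryA text.toList (text.toList.take N) (N : ℤ)
        (PySem.List.pyGetD (pvUniqueValues text) j "")]) []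
      = pvRow text.toList N := by
  rw [PySem.List.foldl_pyRange_zero_pyGetD (pvUniqueValues text) ""
      (fun tl s => tl ++ [pvEntryA text.toList (text.toList.take N) (N : ℤ) s]) [],
    PySem.List.foldl_append_singleton_eq_map, List.nil_append, pvUniqueValues_eq,
    List.map_map, pvRow]
  apply List.map_congr_left
  intro c hcd
  exact pvEntryA_eq hN ((PySem.List.mem_dedup _ _).mp hcd)

theorem pvA_loop (text : String) : ∀ n : ℕ, n ≤ text.toList.length + 1 →
    (PySem.List.pyRange 0 (n : ℤ) 1).foldl (pvStepA text.toList (pvUniqueValues text)) ([], [])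
      = (if n ≤ text.toList.length then text.toList.take n else [],
         (List.range n).map (pvRow text.toList)) := by
  intro n
  induction n with
  | zero => simp [PySem.List.pyRange_one_eq_nil]
  | succ n ih =>
    intro hn
    rw [show ((n + 1 : ℕ) : ℤ) = (n : ℤ) + 1 by push_cast; ring,
      PySem.List.pyRange_one_succ_right (by positivity), List.foldl_append, ih (by omega)]
    simp only [List.foldl_cons, List.foldl_nil]
    rw [if_pos (by omega : n ≤ text.toList.length)]
    simp only [pvStepA]
    rw [pvInnerA_eq text (show n ≤ text.toList.length by omega)]
    rw [show (List.range (n + 1)).map (pvRow text.toList)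
        = (List.range n).map (pvRow text.toList) ++ [pvRow text.toList n] by
      simp [List.range_succ]]
    by_cases hnm : n < text.toList.length
    · have hlt : (n : ℤ) < PySem.List.len text.toList := by
        rw [PySem.List.len_eq]; exact_mod_cast hnm
      rw [if_pos hlt, if_pos (by omega : n + 1 ≤ text.toList.length)]
      rw [show PySem.List.pyGetD text.toList (n : ℤ) ' ' = text.toList.getD n ' ' by
          simp [PySem.List.pyGetD_natCast],
        ← pvTake_succ_getD hnm]
    · rw [if_neg (by rw [PySem.List.len_eq]; omega : ¬ ((n : ℤ) < PySem.List.len text.toList)),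
        if_neg (by omega : ¬ (n + 1 ≤ text.toList.length))]

theorem pvFaTable_eq (text : String) :
    faTable text = ((List.range (text.toList.length + 1)).map (pvRow text.toList),
      (PySem.List.dedup text.toList).map pvCharStr) := by
  have hlen : PySem.List.len text.toList + 1 = ((text.toList.length + 1 : ℕ) : ℤ) := by
    rw [PySem.List.len_eq]; push_cast; ring
  simp only [faTable, hlen]
  rw [pvA_loop text (text.toList.length + 1) le_rfl, pvUniqueValues_eq]

-- B's inner loop builds pvRow whenever fallback is pointwise given by f on the alphabet
theorem pvRowB_eq {p : List Char} {N : ℕ} (fb : List ℤ) (f : Char → ℤ)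
    (hfb : fb = (PySem.List.dedup p).map f)
    (hprop : ∀ c ∈ PySem.List.dedup p,
      (if N < p.length ∧ c = p.getD N ' ' then (N : ℤ) + 1 else f c) = ((pvDelta p N c : ℕ) : ℤ)) :
    (PySem.List.enumerate ((PySem.List.dedup p).map pvCharStr) 0).foldl
      (fun row jc =>
        row ++ [if (N : ℤ) < PySem.List.len p ∧ jc.2 = pvCharStr (PySem.List.pyGetD p (N : ℤ) ' ')
                then (N : ℤ) + 1
                else PySem.List.pyGetD fb jc.1 0]) []
      = pvRow p N := by
  rw [PySem.List.foldl_append_singleton_eq_map, List.nil_append]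
  apply List.ext_getElem
  · simp [pvRow, PySem.List.length_enumerate]
  · intro k h1 h2
    simp only [List.getElem_map, PySem.List.getElem_enumerate]
    have hk : k < (PySem.List.dedup p).length := by
      simpa [PySem.List.length_enumerate] using h1
    have hc : (PySem.List.dedup p)[k] ∈ PySem.List.dedup p := List.getElem_mem hk
    have hmem : (PySem.List.dedup p)[k] ∈ p := (PySem.List.mem_dedup _ _).mp hc
    have hgetfb : PySem.List.pyGetD fb ((0 : ℤ) + (k : ℤ)) 0 = f ((PySem.List.dedup p)[k]) := by
      rw [zero_add, PySem.List.pyGetD_natCast, hfb,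
        List.getD_eq_getElem _ 0 (by simpa using hk), List.getElem_map]
    have hgetp : PySem.List.pyGetD p (N : ℤ) ' ' = p.getD N ' ' := by
      simp [PySem.List.pyGetD_natCast]
    have hcond : ((N : ℤ) < PySem.List.len p ∧
        pvCharStr ((PySem.List.dedup p)[k]'hk)
          = pvCharStr (PySem.List.pyGetD p (N : ℤ) ' '))
        ↔ (N < p.length ∧ (PySem.List.dedup p)[k] = p.getD N ' ') := by
      rw [hgetp, PySem.List.len_eq]
      constructor
      · rintro ⟨ha, hb⟩; exact ⟨by exact_mod_cast ha, pvCharStr_inj.mp hb⟩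
      · rintro ⟨ha, hb⟩; exact ⟨by exact_mod_cast ha, pvCharStr_inj.mpr hb⟩
    have hrow : (pvRow p N)[k]'h2 = ((pvDelta p N ((PySem.List.dedup p)[k]) : ℕ) : ℤ) := by
      simp [pvRow]
    rw [hrow, ← hprop _ hc]
    by_cases hcc : N < p.length ∧ (PySem.List.dedup p)[k] = p.getD N ' '
    · rw [if_pos (hcond.mpr hcc), if_pos hcc]
    · rw [if_neg (fun h => hcc (hcond.mp h)), if_neg hcc, hgetfb]

theorem pvPi_min_one (p : List Char) : pvPi p (min 1 p.length) = 0 := by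
  cases p with
  | nil => rfl
  | cons a t =>
    have : min 1 (a :: t).length = 1 := by simp
    rw [this, pvPi_succ, pvG_zero]

theorem pvB_loop (text : String) : ∀ n : ℕ, n ≤ text.toList.length + 1 →
    (PySem.List.pyRange 0 (n : ℤ) 1).foldl
      (pvStepB text.toList ((PySem.List.dedup text.toList).map pvCharStr)) ([], 0)
      = ((List.range n).map (pvRow text.toList),
         ((pvPi text.toList (min n text.toList.length) : ℕ) : ℤ)) := by
  set p := text.toList with hp
  intro n
  induction n with
  | zero => simp [PySem.List.pyRange_one_eq_nil, pvPi]
  | succ n ih =>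
    intro hn
    have hnm : n ≤ p.length := by omega
    rw [show ((n + 1 : ℕ) : ℤ) = (n : ℤ) + 1 by push_cast; ring,
      PySem.List.pyRange_one_succ_right (by positivity), List.foldl_append, ih (by omega)]
    simp only [List.foldl_cons, List.foldl_nil]
    rw [show min n p.length = n from by omega]
    simp only [pvStepB]
    rw [show (List.range (n + 1)).map (pvRow p)
        = (List.range n).map (pvRow p) ++ [pvRow p n] by simp [List.range_succ]]
    by_cases hn0 : n = 0
    · subst hn0
      have hprop0 : ∀ c ∈ PySem.List.dedup p,
          (if 0 < p.length ∧ c = p.getD 0 ' ' then (((0 : ℕ) : ℤ)) + 1 else (0 : ℤ))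
            = ((pvDelta p 0 c : ℕ) : ℤ) := by
        intro c hcd
        unfold pvDelta
        split_ifs with hm
        · norm_num
        · rw [pvG_zero]; norm_num
      have hfb : PySem.List.pyRepeat [(0 : ℤ)]
          (PySem.List.len ((PySem.List.dedup p).map pvCharStr))
          = (PySem.List.dedup p).map (fun _ => (0 : ℤ)) := by
        rw [PySem.List.pyRepeat_singleton, PySem.List.len_eq]
        simp [List.map_const']
      rw [if_neg (by simp), hfb,
        pvRowB_eq ((PySem.List.dedup p).map (fun _ => (0 : ℤ))) (fun _ => (0 : ℤ)) rfl hprop0,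
        if_neg (by simp)]
      congr 1
      rw [pvPi_min_one]
      rfl
    · -- 1 ≤ n ≤ p.length
      have h1n : 1 ≤ n := by omega
      have hpi_lt : pvPi p n < n := pvPi_lt h1n
      have hfb : PySem.List.pyGetD ((List.range n).map (pvRow p))
          ((pvPi p n : ℕ) : ℤ) [] = pvRow p (pvPi p n) := by
        rw [PySem.List.pyGetD_natCast,
          List.getD_eq_getElem _ [] (by simpa using hpi_lt), List.getElem_map,
          List.getElem_range]
      have hprop : ∀ c ∈ PySem.List.dedup p,
          (if n < p.length ∧ c = p.getD n ' ' then (n : ℤ) + 1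
           else ((pvDelta p (pvPi p n) c : ℕ) : ℤ)) = ((pvDelta p n c : ℕ) : ℤ) := by
        intro c hcd
        by_cases hcc : n < p.length ∧ c = p.getD n ' '
        · rw [if_pos hcc]
          unfold pvDelta
          rw [if_pos hcc]
          push_cast; ring
        · rw [if_neg hcc, ← pvCrux h1n hnm c]
          conv_rhs => rw [pvDelta, if_neg hcc]
      rw [if_pos (by exact_mod_cast hn0 : ((n : ℤ) ≠ 0)), hfb,
        pvRowB_eq (pvRow p (pvPi p n)) (fun c => ((pvDelta p (pvPi p n) c : ℕ) : ℤ)) rfl hprop]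
      congr 1
      by_cases hlt : n < p.length
      · rw [if_pos ⟨by exact_mod_cast h1n, by rw [PySem.List.len_eq]; exact_mod_cast hlt⟩]
        have hgetp : PySem.List.pyGetD p (n : ℤ) ' ' = p.getD n ' ' := by
          simp [PySem.List.pyGetD_natCast]
        have hmem : pvCharStr (p.getD n ' ') ∈ (PySem.List.dedup p).map pvCharStr := by
          apply List.mem_map_of_mem
          exact (PySem.List.mem_dedup _ _).mpr (by
            rw [List.getD_eq_getElem p ' ' hlt]; exact List.getElem_mem hlt)
        obtain ⟨k, hk⟩ : ∃ k, PySem.List.index? ((PySem.List.dedup p).map pvCharStr)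
            (pvCharStr (p.getD n ' ')) = some k :=
          Option.isSome_iff_exists.mp ((PySem.List.index?_isSome_iff _ _).mpr hmem)
        obtain ⟨hklen, hkval, -⟩ := PySem.List.getElem_of_index?_eq_some hk
        have hkd : k < (PySem.List.dedup p).length := by simpa using hklen
        have hdk : (PySem.List.dedup p)[k] = p.getD n ' ' := by
          have hkv := hkval
          simp only [List.getElem_map] at hkv
          exact pvCharStr_inj.mp hkv
        rw [hgetp, hk, Option.getD_some, pvRow, PySem.List.pyGetD_natCast,
          List.getD_eq_getElem _ 0 (by simpa using hkd), List.getElem_map, hdk,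
          ← pvCrux h1n hnm (p.getD n ' '), show min (n + 1) p.length = n + 1 from by omega,
          pvPi_succ]
      · have hne : n = p.length := by omega
        rw [if_neg (by rw [PySem.List.len_eq]; omega), show min (n + 1) p.length = n from by omega]

theorem pvFaTable_alt_eq (text : String) :
    faTable_alt text = ((List.range (text.toList.length + 1)).map (pvRow text.toList),
      (PySem.List.dedup text.toList).map pvCharStr) := by
  have hlen : PySem.List.len text.toList + 1 = ((text.toList.length + 1 : ℕ) : ℤ) := by
    rw [PySem.List.len_eq]; push_cast; ring
  simp only [faTable_alt, hlen]
  rw [pvB_loop text (text.toList.length + 1) le_rfl]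

-- ===== VERDICT (by name: the statement is the Claim_ definition above) =====
theorem faTable_spec : Claim_equal_faTable := by
  intro text _
  unfold Spec_faTable
  rw [pvFaTable_eq, pvFaTable_alt_eq]
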